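-- pv_equiv track=rewrite | github.com/AlpetGexha/Techfest-Kosovo-Coding-Contest-2024 | 3. Go to the Location - 1/main.py | calculate_total_voltage
-- ===== SOURCE A (Python) =====
-- def calculate_total_voltage(adapter_ratings, port_voltages):
--     # Parse the adapter ratings and port voltages
--     adapters = sorted(adapter_ratings)
--     ports = sorted(port_voltages, reverse=True)
--
--     # Determine the motorcycle's built-in charger voltage
--     highest_adapter = max(adapters)
--     motorcycle_voltage = highest_adapter + 3
--
--     total_voltage = 0
--     used_ports = set()
--
--     # Match adapters to ports
--     for adapter in adapters:
--         for port in ports: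
--             if port not in used_ports and port <= adapter:
--                 total_voltage += adapter + port
--                 used_ports.add(port)
--                 break
--
--     # Find the highest available port for the motorcycle
--     for port in ports:
--         if port not in used_ports:
--             total_voltage += motorcycle_voltage + port
--             break
--
--     return total_voltage
-- ===== SOURCE B (Python) =====
-- def calculate_total_voltage(adapter_ratings, port_voltages):
--     adapters = sorted(adapter_ratings)
--     dports = sorted(set(port_voltages))
--     motorcycle_voltage = adapters[-1] + 3
--
--     total = 0
--     stack = []
--     i = 0
--     # Adapters ascending: push every distinct port <= adapter onto the stack,
--     # then the stack top is the largest still-available port <= adapter.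
--     for a in adapters:
--         while i < len(dports) and dports[i] <= a:
--             stack.append(dports[i])
--             i += 1
--         if stack:
--             total += a + stack.pop()
--
--     # Highest still-available port for the built-in charger.
--     if i < len(dports):
--         total += motorcycle_voltage + dports[-1]
--     elif stack:
--         total += motorcycle_voltage + stack[-1]
--     return total
-- ===== Notes on version B (the rewrite author's own statement) =====
-- stated objective: faster
-- what changed: Replaces the per-adapter rescan of the full descending port list against a growing used-set by one sort of the distinct ports plus a single amortised sweep with a monotone pointer and a stack of still-available ports, popping the stack top as the best match for each adapter.
import Mathlib
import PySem

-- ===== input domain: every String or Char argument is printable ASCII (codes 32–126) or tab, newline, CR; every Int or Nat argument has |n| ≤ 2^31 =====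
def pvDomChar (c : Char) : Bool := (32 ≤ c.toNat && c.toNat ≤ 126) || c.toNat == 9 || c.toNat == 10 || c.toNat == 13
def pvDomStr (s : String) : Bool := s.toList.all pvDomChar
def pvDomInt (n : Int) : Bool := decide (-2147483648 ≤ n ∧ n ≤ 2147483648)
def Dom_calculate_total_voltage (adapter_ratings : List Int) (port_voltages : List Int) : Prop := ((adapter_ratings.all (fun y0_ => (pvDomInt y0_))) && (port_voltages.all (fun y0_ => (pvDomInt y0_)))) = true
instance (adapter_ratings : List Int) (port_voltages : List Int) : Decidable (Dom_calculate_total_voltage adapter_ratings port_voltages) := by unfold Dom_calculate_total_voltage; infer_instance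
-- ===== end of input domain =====

-- B replaces A's rescans of the full port list (per adapter, against a used-set) by one amortised
-- sweep over the sorted distinct ports with a stack of still-available ports ≤ the current adapter.

-- ===== PORT A =====
-- inner loop: 'for port in ports: if port not in used_ports and port <= adapter: …; break'
def pvScanA (a : Int) (ports : List Int) (used : PySem.Set Int) : Option Int :=
  match ports with
  | [] => none
  | p :: ps => if used.contains p = false ∧ p ≤ a then some p else pvScanA a ps used

-- outer loop over adapters, threading (total_voltage, used_ports)
def pvLoopA (adapters : List Int) (ports : List Int) (total : Int) (used : PySem.Set Int) : Int × PySem.Set Int :=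
  match adapters with
  | [] => (total, used)
  | a :: rest =>
    match pvScanA a ports used with
    | some p => pvLoopA rest ports (total + (a + p)) (PySem.Set.add used p)
    | none => pvLoopA rest ports total used

-- final loop: first port not in used_ports
def pvMotoA (ports : List Int) (used : PySem.Set Int) : Option Int :=
  match ports with
  | [] => none
  | p :: ps => if used.contains p = false then some p else pvMotoA ps used

def calculate_total_voltage (adapter_ratings : List Int) (port_voltages : List Int) : Int :=
  let adapters := PySem.List.sorted adapter_ratings (fun x => x)
  let ports := PySem.List.sorted port_voltages (fun x => x) true
  match PySem.List.max? adapters (fun x => x) with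
  | none => 0    -- max([]) raises ValueError: excluded by Pre_
  | some highest_adapter =>
    let motorcycle_voltage := highest_adapter + 3
    let st := pvLoopA adapters ports 0 PySem.Set.empty
    match pvMotoA ports st.2 with
    | some p => st.1 + (motorcycle_voltage + p)
    | none => st.1

-- ===== PORT B =====
-- 'while i < len(dports) and dports[i] <= a: stack.append(dports[i]); i += 1'
-- (rem is dports[i:]; the stack is kept head = top)
def pvPushB (a : Int) (rem stack : List Int) : List Int × List Int :=
  match rem with
  | [] => ([], stack)
  | p :: ps => if p ≤ a then pvPushB a ps (p :: stack) else (p :: ps, stack)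

-- 'for a in adapters: push…; if stack: total += a + stack.pop()'
def pvLoopB (adapters rem stack : List Int) (total : Int) : Int × List Int × List Int :=
  match adapters with
  | [] => (total, rem, stack)
  | a :: rest =>
    let rs := pvPushB a rem stack
    match rs.2 with
    | [] => pvLoopB rest rs.1 [] total
    | p :: s => pvLoopB rest rs.1 s (total + (a + p))

def calculate_total_voltage_alt (adapter_ratings : List Int) (port_voltages : List Int) : Int :=
  let adapters := PySem.List.sorted adapter_ratings (fun x => x)
  let dports := PySem.List.sorted (PySem.Set.ofList port_voltages) (fun x => x)
  match adapters.getLast? with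
  | none => 0    -- adapters[-1] raises IndexError: excluded by Pre_
  | some hi =>
    let mv := hi + 3
    let st := pvLoopB adapters dports [] 0
    match st.2.1 with
    | _ :: _ => st.1 + (mv + dports.getLastD 0)   -- 'if i < len(dports): total += mv + dports[-1]'
    | [] =>
      match st.2.2 with
      | p :: _ => st.1 + (mv + p)                 -- 'elif stack: total += mv + stack[-1]'
      | [] => st.1

-- ===== PRECONDITION & SPEC =====
-- Pre_ excludes only the empty adapter list, on which A raises ValueError (max of empty sequence).
def Pre_calculate_total_voltage (adapter_ratings : List Int) (port_voltages : List Int) : Prop :=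
  adapter_ratings ≠ []
instance (adapter_ratings : List Int) (port_voltages : List Int) : Decidable (Pre_calculate_total_voltage adapter_ratings port_voltages) := by unfold Pre_calculate_total_voltage; infer_instance

def pvWitness_calculate_total_voltage : List Int × List Int := ([3, 1, 2], [2, 5, 2, 1])

def Spec_calculate_total_voltage (adapter_ratings : List Int) (port_voltages : List Int) (out : Int) : Prop := out = calculate_total_voltage_alt adapter_ratings port_voltages
instance (adapter_ratings : List Int) (port_voltages : List Int) (out : Int) : Decidable (Spec_calculate_total_voltage adapter_ratings port_voltages out) := by unfold Spec_calculate_total_voltage; infer_instance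

-- ===== CLAIM (what is proved, stated in full; the proofs are below) =====
def Claim_equal_calculate_total_voltage : Prop := ∀ (adapter_ratings : List Int) (port_voltages : List Int), Dom_calculate_total_voltage adapter_ratings port_voltages → Pre_calculate_total_voltage adapter_ratings port_voltages → Spec_calculate_total_voltage adapter_ratings port_voltages (calculate_total_voltage adapter_ratings port_voltages)

-- ===== LEMMAS AND PROOFS =====

-- In a Pairwise-(≤) list every member is bounded by the last element.
lemma pv_mem_le_getLast? {l : List Int} (hl : l.Pairwise (· ≤ ·)) {x : Int} (hx : x ∈ l) :
    ∃ y, l.getLast? = some y ∧ x ≤ y := by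
  induction l with
  | nil => cases hx
  | cons a t ih =>
    rw [List.pairwise_cons] at hl
    cases t with
    | nil =>
      simp only [List.mem_singleton] at hx
      exact ⟨a, rfl, le_of_eq hx⟩
    | cons b u =>
      obtain ⟨y, hy⟩ : ∃ y, (b :: u).getLast? = some y :=
        ⟨(b :: u).getLast (by simp), List.getLast?_eq_some_getLast _⟩
      have hymem : y ∈ b :: u := List.mem_of_getLast? hy
      refine ⟨y, by rw [List.getLast?_cons_cons, hy], ?_⟩
      rcases List.mem_cons.mp hx with rfl | hxt
      · exact hl.1 y hymem
      · obtain ⟨y', hy', hxy'⟩ := ih hl.2 hxt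
        rw [hy] at hy'
        cases hy'
        exact hxy'

-- A's inner scan of the descending port list returns exactly the stated maximum.
lemma pvScanA_eq_some (a p : Int) (ports : List Int) (used : PySem.Set Int)
    (hports : ports.Pairwise (fun x y => y ≤ x))
    (hp : p ∈ ports) (h1 : used.contains p = false) (h2 : p ≤ a)
    (hmax : ∀ y ∈ ports, used.contains y = false → y ≤ a → y ≤ p) :
    pvScanA a ports used = some p := by
  induction ports with
  | nil => cases hp
  | cons x t ih =>
    rw [List.pairwise_cons] at hports
    unfold pvScanA
    by_cases hc : used.contains x = false ∧ x ≤ a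
    · rw [if_pos hc]
      have hxp : x ≤ p := hmax x (by simp) hc.1 hc.2
      have hpx : p ≤ x := by
        rcases List.mem_cons.mp hp with rfl | hpt
        · exact le_refl _
        · exact hports.1 p hpt
      rw [le_antisymm hxp hpx]
    · rw [if_neg hc]
      have hpt : p ∈ t := by
        rcases List.mem_cons.mp hp with rfl | h
        · exact absurd ⟨h1, h2⟩ hc
        · exact h
      exact ih hports.2 hpt (fun y hy hyc hya => hmax y (by simp [hy]) hyc hya)

lemma pvScanA_eq_none (a : Int) (ports : List Int) (used : PySem.Set Int)
    (h : ∀ y ∈ ports, used.contains y = false → ¬ y ≤ a) :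
    pvScanA a ports used = none := by
  induction ports with
  | nil => rfl
  | cons x t ih =>
    unfold pvScanA
    rw [if_neg (fun hc => h x (by simp) hc.1 hc.2)]
    exact ih (fun y hy => h y (by simp [hy]))

lemma pvMotoA_eq_some (p : Int) (ports : List Int) (used : PySem.Set Int)
    (hports : ports.Pairwise (fun x y => y ≤ x))
    (hp : p ∈ ports) (h1 : used.contains p = false)
    (hmax : ∀ y ∈ ports, used.contains y = false → y ≤ p) :
    pvMotoA ports used = some p := by
  induction ports with
  | nil => cases hp
  | cons x t ih =>
    rw [List.pairwise_cons] at hports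
    unfold pvMotoA
    by_cases hc : used.contains x = false
    · rw [if_pos hc]
      have hxp : x ≤ p := hmax x (by simp) hc
      have hpx : p ≤ x := by
        rcases List.mem_cons.mp hp with rfl | hpt
        · exact le_refl _
        · exact hports.1 p hpt
      rw [le_antisymm hxp hpx]
    · rw [if_neg hc]
      have hpt : p ∈ t := by
        rcases List.mem_cons.mp hp with rfl | h
        · exact absurd h1 hc
        · exact h
      exact ih hports.2 hpt (fun y hy hyc => hmax y (by simp [hy]) hyc)

lemma pvMotoA_eq_none (ports : List Int) (used : PySem.Set Int)
    (h : ∀ y ∈ ports, used.contains y = true) :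
    pvMotoA ports used = none := by
  induction ports with
  | nil => rfl
  | cons x t ih =>
    unfold pvMotoA
    have hx := h x (by simp)
    rw [if_neg (fun hc => by rw [hx] at hc; cases hc)]
    exact ih (fun y hy => h y (by simp [hy]))

-- B's push loop is a takeWhile/dropWhile split of the remaining distinct ports.
lemma pvPushB_spec (a : Int) (rem stack : List Int) :
    pvPushB a rem stack =
      (rem.dropWhile (fun p => decide (p ≤ a)),
       (rem.takeWhile (fun p => decide (p ≤ a))).reverse ++ stack) := by
  induction rem generalizing stack with
  | nil => rfl
  | cons p ps ih =>
    unfold pvPushB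
    by_cases hc : p ≤ a
    · rw [if_pos hc, ih]
      simp [List.takeWhile_cons, List.dropWhile_cons, hc]
    · rw [if_neg hc]
      simp [List.takeWhile_cons, List.dropWhile_cons, hc]

lemma pv_dropWhile_gt (a : Int) (rem : List Int) (h : rem.Pairwise (· < ·)) :
    ∀ x ∈ rem.dropWhile (fun p => decide (p ≤ a)), ¬ x ≤ a := by
  induction rem with
  | nil => intro x hx; cases hx
  | cons p ps ih =>
    rw [List.pairwise_cons] at h
    intro x hx
    rw [List.dropWhile_cons] at hx
    by_cases hc : p ≤ a
    · simp only [decide_eq_true hc, if_true] at hx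
      exact ih h.2 x hx
    · simp only [decide_eq_false hc, if_false] at hx
      rcases List.mem_cons.mp hx with rfl | hxt
      · exact hc
      · exact fun hxa => hc (le_trans (le_of_lt (h.1 x hxt)) hxa)

lemma pvLoopA_cons (a : Int) (rest ports : List Int) (total : Int) (used : PySem.Set Int) :
    pvLoopA (a :: rest) ports total used
      = match pvScanA a ports used with
        | some p => pvLoopA rest ports (total + (a + p)) (PySem.Set.add used p)
        | none => pvLoopA rest ports total used := rfl

lemma pvLoopB_cons (a : Int) (rest rem stack : List Int) (total : Int) :
    pvLoopB (a :: rest) rem stack total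
      = match (pvPushB a rem stack).2 with
        | [] => pvLoopB rest (pvPushB a rem stack).1 [] total
        | p :: s => pvLoopB rest (pvPushB a rem stack).1 s (total + (a + p)) := rfl

-- The main loop invariant: A's (total, used) and B's (total, rem, stack) stay linked.
lemma pv_loop_eq (D ports : List Int) (hD : D.Pairwise (· < ·))
    (hports : ports.Pairwise (fun x y => y ≤ x))
    (hmem : ∀ x : Int, x ∈ ports ↔ x ∈ D) :
    ∀ (as : List Int), as.Pairwise (· ≤ ·) →
    ∀ (used : PySem.Set Int) (rem stack : List Int) (total : Int),
    stack.reverse ++ rem = D.filter (fun p => !used.contains p) →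
    rem <:+ D →
    (∀ x ∈ stack, ∀ b ∈ as, x ≤ b) →
    (pvLoopA as ports total used).1 = (pvLoopB as rem stack total).1 ∧
    ((pvLoopB as rem stack total).2.2).reverse ++ (pvLoopB as rem stack total).2.1
      = D.filter (fun p => !(pvLoopA as ports total used).2.contains p) ∧
    (pvLoopB as rem stack total).2.1 <:+ D := by
  intro as
  induction as with
  | nil =>
    intro _ used rem stack total h1 h2 _
    exact ⟨rfl, h1, h2⟩
  | cons a rest ih =>
    intro has used rem stack total h1 h2 h3
    rw [List.pairwise_cons] at has
    have hpush := pvPushB_spec a rem stack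
    set T := rem.takeWhile (fun p => decide (p ≤ a)) with hT
    set Rr := rem.dropWhile (fun p => decide (p ≤ a)) with hR
    have hremP : rem.Pairwise (· < ·) := List.Pairwise.sublist h2.sublist hD
    have hRgt : ∀ x ∈ Rr, ¬ x ≤ a := pv_dropWhile_gt a rem hremP
    have hRsuf : Rr <:+ D := (List.dropWhile_suffix _).trans h2
    have hF : (T.reverse ++ stack).reverse ++ Rr = D.filter (fun p => !used.contains p) := by
      rw [List.reverse_append, List.reverse_reverse, List.append_assoc, ← h1, hT, hR,
        List.takeWhile_append_dropWhile]
    have hstack'le : ∀ x ∈ T.reverse ++ stack, x ≤ a := by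
      intro x hx
      rcases List.mem_append.mp hx with hxT | hxs
      · have hxT2 : x ∈ T := List.mem_reverse.mp hxT
        rw [hT] at hxT2
        have := List.mem_takeWhile_imp hxT2
        exact of_decide_eq_true this
      · exact h3 x hxs a (List.mem_cons_self)
    cases hstack' : T.reverse ++ stack with
    | nil =>
      have hscan : pvScanA a ports used = none := by
        apply pvScanA_eq_none
        intro y hy hyc hya
        have hyF : y ∈ D.filter (fun p => !used.contains p) :=
          List.mem_filter.mpr ⟨(hmem y).1 hy, by rw [hyc]; rfl⟩
        rw [← hF, hstack'] at hyF
        simp only [List.reverse_nil, List.nil_append] at hyF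
        exact hRgt y hyF hya
      have hstepA : pvLoopA (a :: rest) ports total used = pvLoopA rest ports total used := by
        rw [pvLoopA_cons, hscan]
      have hstepB : pvLoopB (a :: rest) rem stack total = pvLoopB rest Rr [] total := by
        rw [pvLoopB_cons]; simp only [hpush, hstack']
      rw [hstepA, hstepB]
      refine ih has.2 used Rr [] total ?_ hRsuf (by intro x hx; cases hx)
      rw [← hF, hstack']
    | cons p s =>
      have hpF : p ∈ D.filter (fun p => !used.contains p) := by
        rw [← hF, hstack']; simp
      have hpD : p ∈ D := (List.mem_filter.mp hpF).1
      have hpavail : used.contains p = false := by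
        have := (List.mem_filter.mp hpF).2; simpa using this
      have hpa : p ≤ a := hstack'le p (by rw [hstack']; exact List.mem_cons_self)
      have hdecomp : s.reverse ++ (p :: Rr) = D.filter (fun p => !used.contains p) := by
        rw [← hF, hstack']; simp
      have hpairD : (s.reverse ++ (p :: Rr)).Pairwise (· < ·) := by
        rw [hdecomp]; exact hD.filter _
      have hsp : ∀ y ∈ s.reverse, y < p :=
        fun y hy => (List.pairwise_append.mp hpairD).2.2 y hy p List.mem_cons_self
      have hpR : ∀ y ∈ Rr, p < y := by
        have := List.pairwise_cons.mp (List.pairwise_append.mp hpairD).2.1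
        exact this.1
      have hmaxp : ∀ y ∈ ports, used.contains y = false → y ≤ a → y ≤ p := by
        intro y hy hyc hya
        have hyF : y ∈ s.reverse ++ (p :: Rr) := by
          rw [hdecomp]; exact List.mem_filter.mpr ⟨(hmem y).1 hy, by rw [hyc]; rfl⟩
        rcases List.mem_append.mp hyF with hys | hyc2
        · exact le_of_lt (hsp y hys)
        · rcases List.mem_cons.mp hyc2 with rfl | hyR
          · exact le_refl _
          · exact absurd hya (hRgt y hyR)
      have hscan := pvScanA_eq_some a p ports used hports ((hmem p).2 hpD) hpavail hpa hmaxp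
      have hstepA : pvLoopA (a :: rest) ports total used
          = pvLoopA rest ports (total + (a + p)) (PySem.Set.add used p) := by
        rw [pvLoopA_cons, hscan]
      have hstepB : pvLoopB (a :: rest) rem stack total = pvLoopB rest Rr s (total + (a + p)) := by
        rw [pvLoopB_cons]; simp only [hpush, hstack']
      have hcmem : ∀ (s : PySem.Set Int) (q : Int), s.contains q = true ↔ q ∈ s :=
        fun s q => List.contains_iff_mem
      have hcontadd : ∀ q : Int, (!(PySem.Set.add used p).contains q) = (!(q == p) && !used.contains q) := by
        intro q
        rw [Bool.eq_iff_iff]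
        simp only [Bool.not_eq_eq_eq_not, Bool.not_true, Bool.and_eq_true, Bool.not_eq_true',
          beq_eq_false_iff_ne, ne_eq]
        constructor
        · intro hq
          have hnm : ¬ q ∈ PySem.Set.add used p := fun hm => by
            rw [(hcmem _ _).mpr hm] at hq; cases hq
          rw [PySem.Set.mem_add] at hnm
          push_neg at hnm
          refine ⟨hnm.2, ?_⟩
          cases hcq : PySem.Set.contains used q with
          | false => rfl
          | true => exact absurd ((hcmem _ _).mp hcq) hnm.1
        · rintro ⟨hqp, hqu⟩
          cases hcq : PySem.Set.contains (PySem.Set.add used p) q with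
          | false => rfl
          | true =>
            have hm := (hcmem _ _).mp hcq
            rw [PySem.Set.mem_add] at hm
            rcases hm with hm | rfl
            · rw [(hcmem _ _).mpr hm] at hqu; cases hqu
            · exact absurd rfl hqp
      have hnew1 : s.reverse ++ Rr = D.filter (fun q => !(PySem.Set.add used p).contains q) := by
        have hff : D.filter (fun q => !(PySem.Set.add used p).contains q)
            = (D.filter (fun q => !used.contains q)).filter (fun q => !(q == p)) := by
          rw [List.filter_filter]
          exact List.filter_congr (fun q _ => hcontadd q)
        rw [hff, ← hdecomp, List.filter_append, List.filter_cons]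
        have h1f : s.reverse.filter (fun q => !(q == p)) = s.reverse :=
          List.filter_eq_self.mpr (fun y hy => by simp [ne_of_lt (hsp y hy)])
        have h2f : Rr.filter (fun q => !(q == p)) = Rr :=
          List.filter_eq_self.mpr (fun y hy => by simp [(ne_of_lt (hpR y hy)).symm])
        simp [h1f, h2f]
      rw [hstepA, hstepB]
      refine ih has.2 (PySem.Set.add used p) Rr s (total + (a + p)) hnew1 hRsuf ?_
      intro x hx b hb
      have hxle : x ≤ a := hstack'le x (by rw [hstack']; exact List.mem_cons_of_mem _ hx)
      exact le_trans hxle (has.1 b hb)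

-- ===== VERDICT (by name: the statement is the Claim_ definition above) =====
theorem calculate_total_voltage_spec : Claim_equal_calculate_total_voltage := by
  intro ar pv _ hpre
  unfold Spec_calculate_total_voltage
  simp only [calculate_total_voltage, calculate_total_voltage_alt]
  set adapters := PySem.List.sorted ar (fun x => x) with hA
  set ports := PySem.List.sorted pv (fun x => x) true with hP
  set D := PySem.List.sorted (PySem.Set.ofList pv) (fun x => x) with hDdef
  have hpairA : adapters.Pairwise (· ≤ ·) := PySem.List.sorted_pairwise ar (fun x => x)
  have hports : ports.Pairwise (fun x y => y ≤ x) := PySem.List.sorted_pairwise_rev pv (fun x => x)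
  have hD : D.Pairwise (· < ·) := PySem.List.sorted_ofList_pairwise_lt pv
  have hmem : ∀ x : Int, x ∈ ports ↔ x ∈ D := by
    intro x
    rw [hP, hDdef, PySem.List.mem_sorted, PySem.List.mem_sorted, PySem.Set.mem_ofList]
  -- the built-in charger voltage: max(adapters) is the last element of the ascending sort
  cases hm : PySem.List.max? adapters (fun x => x) with
  | none =>
    exact absurd ((PySem.List.sorted_eq_nil_iff ar _ _).mp
      ((PySem.List.max?_eq_none_iff _ _).mp hm)) hpre
  | some m =>
    obtain ⟨g, hg, hmg⟩ := pv_mem_le_getLast? hpairA (PySem.List.max?_mem hm)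
    have hgm : g = m := le_antisymm
      (PySem.List.max?_isMax hm g (List.mem_of_getLast? hg)) hmg
    rw [hg, hgm]
    -- run the two loops from the linked initial states
    have hmain := pv_loop_eq D ports hD hports hmem adapters hpairA
      PySem.Set.empty D [] 0
      (by simpa using (List.filter_eq_self.mpr (fun a _ => rfl)).symm)
      List.suffix_rfl
      (by intro x hx; cases hx)
    obtain ⟨htot, hinv, hsuf⟩ := hmain
    set stA := pvLoopA adapters ports 0 PySem.Set.empty with hstA
    set stB := pvLoopB adapters D [] 0 with hstB
    have hFpair : (stB.2.2.reverse ++ stB.2.1).Pairwise (· < ·) := by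
      rw [hinv]; exact hD.filter _
    have hFmem : ∀ y ∈ ports, stA.2.contains y = false → y ∈ stB.2.2.reverse ++ stB.2.1 := by
      intro y hy hyc
      rw [hinv]
      exact List.mem_filter.mpr ⟨(hmem y).1 hy, by rw [hyc]; rfl⟩
    have hFports : ∀ y ∈ stB.2.2.reverse ++ stB.2.1,
        y ∈ ports ∧ stA.2.contains y = false := by
      intro y hy
      rw [hinv] at hy
      have := List.mem_filter.mp hy
      exact ⟨(hmem y).2 this.1, by simpa using this.2⟩
    cases hrem : stB.2.1 with
    | cons r rs =>
      -- some distinct port was never pushed: the charger takes dports[-1]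
      have hlastrem : (r :: rs).getLast? = some ((r :: rs).getLast (by simp)) :=
        List.getLast?_eq_some_getLast _
      set L := (r :: rs).getLast (by simp) with hL
      have hFlast : (stB.2.2.reverse ++ stB.2.1).getLast? = some L := by
        rw [hrem, List.getLast?_append, hlastrem]; rfl
      have hDlast : D.getLast? = some L := by
        obtain ⟨t, ht⟩ := hsuf
        rw [← ht, hrem, List.getLast?_append, hlastrem]; rfl
      have hLF : L ∈ stB.2.2.reverse ++ stB.2.1 := by
        rw [hrem]
        exact List.mem_append_right _ (List.getLast_mem _)
      have hmoto : pvMotoA ports stA.2 = some L := by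
        apply pvMotoA_eq_some L ports stA.2 hports (hFports L hLF).1 (hFports L hLF).2
        intro y hy hyc
        obtain ⟨y', hy', hyy'⟩ := pv_mem_le_getLast?
          (List.Pairwise.imp (fun h => le_of_lt h) hFpair) (hFmem y hy hyc)
        rw [hFlast] at hy'
        cases hy'
        exact hyy'
      rw [hmoto, List.getLastD_eq_getLast?, hDlast, htot]
      rfl
    | nil =>
      cases hstk : stB.2.2 with
      | cons p s =>
        -- every distinct port was pushed; the charger takes the stack top
        have hFlast : (stB.2.2.reverse ++ stB.2.1).getLast? = some p := by
          rw [hrem, hstk, List.append_nil, List.getLast?_reverse]; rfl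
        have hpF : p ∈ stB.2.2.reverse ++ stB.2.1 := by
          rw [hrem, hstk]; simp
        have hmoto : pvMotoA ports stA.2 = some p := by
          apply pvMotoA_eq_some p ports stA.2 hports (hFports p hpF).1 (hFports p hpF).2
          intro y hy hyc
          obtain ⟨y', hy', hyy'⟩ := pv_mem_le_getLast?
            (List.Pairwise.imp (fun h => le_of_lt h) hFpair) (hFmem y hy hyc)
          rw [hFlast] at hy'
          cases hy'
          exact hyy'
        rw [hmoto, htot]
      | nil =>
        have hmoto : pvMotoA ports stA.2 = none := by
          apply pvMotoA_eq_none
          intro y hy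
          cases hyc : stA.2.contains y with
          | true => rfl
          | false =>
            have := hFmem y hy hyc
            rw [hrem, hstk] at this
            cases this
        rw [hmoto, htot]
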